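-- pv_equiv track=rewrite | github.com/neil-kulkarni/arvada | evaluation/mine.py | split_rules
-- ===== SOURCE A (Python) =====
-- def split_rules(gram_str):
-- 	rule_strs = []
-- 	curr_rule = ''
-- 	for line in gram_str.split('\n'):
-- 		if line.startswith('   '):
-- 				curr_rule += str(line) + '\n'
-- 		else:
-- 				rule_strs.append(str(curr_rule).strip())
-- 				curr_rule = str(line) + '\n'
--
-- 	rule_strs.append(str(curr_rule).strip())
-- 	return rule_strs[1:]
-- ===== SOURCE B (Python) =====
-- def split_rules(gram_str):
--     lines = gram_str.split('\n')
--     n = len(lines)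
--     res = []
--     i = 0
--     while i < n and lines[i].startswith('   '):
--         i += 1
--     while i < n:
--         j = i + 1
--         while j < n and lines[j].startswith('   '):
--             j += 1
--         res.append('\n'.join(lines[i:j]).strip())
--         i = j
--     return res
-- ===== Notes on version B (the rewrite author's own statement) =====
-- stated objective: alternative
-- what changed: A grows a running curr_rule string and flushes it at each non-indented line, dropping the first flush with [1:]; B skips the leading indented segment, then cuts each block as an index slice starting at a non-indented line and joins/strips it, with no running accumulator or dropped sentinel.
import Mathlib
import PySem

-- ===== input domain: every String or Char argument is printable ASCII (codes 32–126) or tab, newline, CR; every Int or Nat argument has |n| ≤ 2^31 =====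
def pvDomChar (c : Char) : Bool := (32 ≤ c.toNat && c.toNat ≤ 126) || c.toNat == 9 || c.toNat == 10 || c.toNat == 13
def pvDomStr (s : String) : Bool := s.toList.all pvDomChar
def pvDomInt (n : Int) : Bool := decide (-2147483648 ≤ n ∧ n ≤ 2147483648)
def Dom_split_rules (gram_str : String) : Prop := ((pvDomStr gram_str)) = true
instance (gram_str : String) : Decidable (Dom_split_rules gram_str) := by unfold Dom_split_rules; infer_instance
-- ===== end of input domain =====

-- B replaces A's running string accumulator with a two-phase structure (skip the leading
-- indented segment, then cut each block as a slice starting at a non-indented line and join it);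
-- objective: alternative decomposition, same cost.

-- ===== PORT A =====
-- strings are handled as List Char (PySem.Chars, exact on the ASCII domain); String.ofList only on output
def splitRulesStep (st : List String × List Char) (line : List Char) : List String × List Char :=
  if PySem.Chars.startswith line [' ', ' ', ' '] then
    (st.1, st.2 ++ line ++ ['\n'])
  else
    (st.1 ++ [String.ofList (PySem.Chars.strip st.2)], line ++ ['\n'])

-- the trailing append of curr_rule and the [1:] slice
def splitRulesFinish (st : List String × List Char) : List String :=
  PySem.List.slice (st.1 ++ [String.ofList (PySem.Chars.strip st.2)]) (some 1) none

def split_rules (gram_str : String) : List String :=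
  splitRulesFinish ((PySem.Chars.splitOn gram_str.toList ['\n']).foldl splitRulesStep ([], []))

-- ===== PORT B =====
def pvIndented (line : List Char) : Bool := PySem.Chars.startswith line [' ', ' ', ' ']

-- the inner while loop of Source B: one block per leading non-indented line, its indented
-- continuation lines taken as a slice, joined with '\n' and stripped
def pvBlocks : List (List Char) → List String
  | [] => []
  | l :: rest =>
      String.ofList (PySem.Chars.strip (PySem.Chars.join ['\n'] (l :: rest.takeWhile pvIndented)))
        :: pvBlocks (rest.dropWhile pvIndented)
termination_by ls => ls.length
decreasing_by
  simpa [Nat.lt_succ_iff] using List.length_dropWhile_le pvIndented rest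

def split_rules_alt (gram_str : String) : List String :=
  pvBlocks ((PySem.Chars.splitOn gram_str.toList ['\n']).dropWhile pvIndented)

-- ===== PRECONDITION & SPEC =====
def Spec_split_rules (gram_str : String) (out : List String) : Prop := out = split_rules_alt gram_str
instance (gram_str : String) (out : List String) : Decidable (Spec_split_rules gram_str out) := by unfold Spec_split_rules; infer_instance

-- ===== CLAIM (what is proved, stated in full; the proofs are below) =====
def Claim_equal_split_rules : Prop := ∀ (gram_str : String), Dom_split_rules gram_str → Spec_split_rules gram_str (split_rules gram_str)

-- ===== LEMMAS AND PROOFS =====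

-- the characters A's accumulator holds for a list of lines: each line followed by '\n'
def pvCatNL (ls : List (List Char)) : List Char := (ls.map (· ++ ['\n'])).flatten

theorem pvCatNL_nil : pvCatNL [] = [] := rfl

theorem pvCatNL_cons (l : List Char) (ls : List (List Char)) :
    pvCatNL (l :: ls) = l ++ '\n' :: pvCatNL ls := by
  simp [pvCatNL]

theorem pvCatNL_eq_join (l : List Char) (ls : List (List Char)) :
    l ++ '\n' :: pvCatNL ls = PySem.Chars.join ['\n'] (l :: ls) ++ ['\n'] := by
  induction ls generalizing l with
  | nil => simp [pvCatNL, PySem.Chars.join, List.intercalate]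
  | cons m t ih =>
      rw [pvCatNL_cons, PySem.Chars.join_cons_cons, ih m]
      simp

theorem pvRstrip_append_newline (xs : List Char) :
    PySem.Chars.rstrip (xs ++ ['\n']) = PySem.Chars.rstrip xs := by
  unfold PySem.Chars.rstrip
  rw [List.reverse_append, List.reverse_singleton, List.singleton_append,
    List.dropWhile_cons_of_pos (by decide)]

theorem pvStrip_append_newline (xs : List Char) :
    PySem.Chars.strip (xs ++ ['\n']) = PySem.Chars.strip xs := by
  unfold PySem.Chars.strip PySem.Chars.lstrip
  rcases h : List.dropWhile PySem.Chars.isspace xs with _ | ⟨y, ys⟩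
  · rw [List.dropWhile_append, h]
    decide
  · rw [List.dropWhile_append, h]
    split_ifs with hif
    · simp at hif
    · exact pvRstrip_append_newline (y :: ys)

theorem pvBlock_eq (l : List Char) (ls : List (List Char)) :
    PySem.Chars.strip (l ++ '\n' :: pvCatNL ls)
      = PySem.Chars.strip (PySem.Chars.join ['\n'] (l :: ls)) := by
  rw [pvCatNL_eq_join, pvStrip_append_newline]

theorem pvFoldl_inv (lines : List (List Char)) (acc : List String) (curr : List Char) :
    (lines.foldl splitRulesStep (acc, curr)).1
        ++ [String.ofList (PySem.Chars.strip (lines.foldl splitRulesStep (acc, curr)).2)]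
      = acc
        ++ String.ofList (PySem.Chars.strip (curr ++ pvCatNL (lines.takeWhile pvIndented)))
          :: pvBlocks (lines.dropWhile pvIndented) := by
  induction lines generalizing acc curr with
  | nil => simp [pvCatNL, pvBlocks]
  | cons l rest ih =>
      by_cases h : pvIndented l = true
      · have hstep : splitRulesStep (acc, curr) l = (acc, curr ++ l ++ ['\n']) := by
          simp [splitRulesStep, pvIndented] at h ⊢
          simp [h]
        rw [List.foldl_cons, hstep, ih]
        rw [List.takeWhile_cons_of_pos h, List.dropWhile_cons_of_pos h, pvCatNL_cons]
        simp
      · have hb : pvIndented l = false := by simpa using h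
        have hstep : splitRulesStep (acc, curr) l
            = (acc ++ [String.ofList (PySem.Chars.strip curr)], l ++ ['\n']) := by
          simp only [pvIndented] at hb
          simp [splitRulesStep, hb]
        rw [List.foldl_cons, hstep, ih]
        rw [List.takeWhile_cons_of_neg (by simp [hb]), List.dropWhile_cons_of_neg (by simp [hb])]
        rw [pvBlocks]
        rw [← pvBlock_eq l (rest.takeWhile pvIndented)]
        simp [pvCatNL_nil]

-- ===== VERDICT (by name: the statement is the Claim_ definition above) =====
theorem split_rules_spec : Claim_equal_split_rules := by
  intro g _
  show split_rules g = split_rules_alt g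
  unfold split_rules split_rules_alt splitRulesFinish
  rw [pvFoldl_inv, PySem.List.slice_from _ (by norm_num)]
  simp
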